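-- pv_equiv track=rewrite | github.com/kamillok505/A4 | tsp.py | fill_none
-- ===== SOURCE A (Python) =====
-- def fill_none(child, parent, start, end):
--     size = len(child)
--     filled_idx = (end + 1) % size
--     parent_idx = (end + 1) % size
--     while None in child:
--         if parent[parent_idx] not in child:
--             child[filled_idx] = parent[parent_idx]
--             filled_idx = (filled_idx + 1) % size
--         parent_idx = (parent_idx + 1) % size
--     return child
-- ===== SOURCE B (Python) =====
-- def fill_none(child, parent, start, end):
--     size = len(child)
--     pos = (end + 1) % size
--     seen = set(g for g in child if g is not None)
--     missing = []
--     for j in range(size):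
--         g = parent[(pos + j) % size]
--         if g not in seen:
--             missing.append(g)
--             seen.add(g)
--     slots = [(pos + j) % size for j in range(size) if child[(pos + j) % size] is None]
--     for idx, g in zip(slots, missing):
--         child[idx] = g
--     return child
-- ===== Notes on version B (the rewrite author's own statement) =====
-- stated objective: simpler
-- what changed: A interleaves scanning parent with placing genes inside a 'while None in child' loop with live membership tests against the mutating child; B instead makes one circular pass collecting the missing genes, a second circular pass collecting the empty-slot indices, and zip-assigns them.
-- outside the precondition, e.g. on fill_none([1, 2], [], 0, 0): A returns [1, 2], B raises IndexError; on fill_none([None, 1], [2, 1], 0, 0): A returns [1, 2], B returns [2, 1]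
import Mathlib
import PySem

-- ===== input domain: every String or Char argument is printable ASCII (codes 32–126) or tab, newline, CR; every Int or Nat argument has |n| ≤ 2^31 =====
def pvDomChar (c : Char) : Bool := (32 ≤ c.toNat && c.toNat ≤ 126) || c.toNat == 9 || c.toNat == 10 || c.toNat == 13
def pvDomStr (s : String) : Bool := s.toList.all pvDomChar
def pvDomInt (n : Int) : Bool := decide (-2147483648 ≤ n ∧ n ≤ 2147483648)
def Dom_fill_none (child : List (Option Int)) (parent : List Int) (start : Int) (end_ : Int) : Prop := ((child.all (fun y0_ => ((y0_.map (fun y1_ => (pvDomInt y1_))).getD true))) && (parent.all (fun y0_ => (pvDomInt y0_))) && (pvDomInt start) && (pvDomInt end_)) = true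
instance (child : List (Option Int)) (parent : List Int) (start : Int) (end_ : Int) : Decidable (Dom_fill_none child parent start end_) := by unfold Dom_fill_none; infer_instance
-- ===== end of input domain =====

-- B replaces A's interleaved scan-and-place while-loop by two circular passes (missing genes,
-- empty slots) zipped together; objective: simpler. Both A and B mutate `child` in place in
-- Python; the equivalence proved here is about the RETURN value (identical mutation under Pre_).

-- ===== PORT A =====
-- A's `while None in child` loop as fuel recursion; fuel (len child)+1 suffices on every
-- Pre_ input (proved below). parent[parent_idx] is read via pyGet? (none = IndexError,
-- unreachable under Pre_; the loop then stops, a guard that only makes the port total).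
def fill_none_loop (parent : List Int) (size : Int) (fuel : Nat)
    (child : List (Option Int)) (filled_idx parent_idx : Int) : List (Option Int) :=
  match fuel with
  | 0 => child
  | fuel + 1 =>
    if none ∈ child then
      match PySem.List.pyGet? parent parent_idx with
      | none => child
      | some g =>
        if some g ∉ child then
          fill_none_loop parent size fuel (PySem.List.pySetD child filled_idx (some g))
            (PySem.Int.mod (filled_idx + 1) size) (PySem.Int.mod (parent_idx + 1) size)
        else
          fill_none_loop parent size fuel child filled_idx (PySem.Int.mod (parent_idx + 1) size)
    else child

-- Python returns `child` itself, all of whose slots hold ints under Pre_;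
-- `.map (·.getD 0)` only realizes the declared type List Int.
def fill_none (child : List (Option Int)) (parent : List Int) (start : Int) (end_ : Int) : List Int :=
  let size : Int := child.length
  let filled_idx := PySem.Int.mod (end_ + 1) size
  let parent_idx := PySem.Int.mod (end_ + 1) size
  (fill_none_loop parent size (child.length + 1) child filled_idx parent_idx).map (fun o => o.getD 0)

-- ===== PORT B =====
-- transliteration of Source B: gather `missing` in one circular pass over parent (live `seen` set),
-- gather the None-slot indices in a second circular pass, then zip-assign.
def fill_none_alt (child : List (Option Int)) (parent : List Int) (start : Int) (end_ : Int) : List Int :=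
  let size : Int := child.length
  let pos := PySem.Int.mod (end_ + 1) size
  let seen : PySem.Set Int := PySem.Set.ofList (child.filterMap (fun g => g))
  let ms := (PySem.List.pyRange 0 size 1).foldl
      (fun (acc : List Int × PySem.Set Int) j =>
        let g := PySem.List.pyGetD parent (PySem.Int.mod (pos + j) size) 0
        if PySem.Set.contains acc.2 g then acc else (acc.1 ++ [g], PySem.Set.add acc.2 g))
      ([], seen)
  let missing := ms.1
  let slots := (PySem.List.pyRange 0 size 1).filterMap
      (fun j =>
        let i := PySem.Int.mod (pos + j) size
        if PySem.List.pyGetD child i none = none then some i else none)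
  ((slots.zip missing).foldl (fun c pg => PySem.List.pySetD c pg.1 (some pg.2)) child).map
    (fun o => o.getD 0)

-- ===== PRECONDITION & SPEC =====
-- Pre_ excludes the inputs where A raises (empty child → ZeroDivisionError; parent shorter than
-- child → IndexError in B, while A may return child untouched when it has no None) or diverges
-- (missing genes ≠ empty slots), and the non-OX states (duplicate genes, None slots not forming
-- the circular block after end) on which A's overwriting of filled slots is accidental.
def Pre_fill_none (child : List (Option Int)) (parent : List Int) (start : Int) (end_ : Int) : Prop :=
  0 < child.length ∧ child.length ≤ parent.length ∧
  (none ∈ child →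
    parent.length = child.length ∧ parent.Nodup ∧
    (child.filterMap (fun g => g)).Nodup ∧
    (∀ g ∈ child.filterMap (fun g => g), g ∈ parent) ∧
    (∀ j < child.length,
      (child[((((end_ + 1) % (child.length : Int)).toNat + j) % child.length)]? = some none ↔
        j < child.count none)))

instance (child : List (Option Int)) (parent : List Int) (start : Int) (end_ : Int) : Decidable (Pre_fill_none child parent start end_) := by unfold Pre_fill_none; infer_instance

def pvWitness_fill_none : List (Option Int) × List Int × Int × Int := ([some 1, none], [1, 2], 0, 0)

def Spec_fill_none (child : List (Option Int)) (parent : List Int) (start : Int) (end_ : Int) (out : List Int) : Prop := out = fill_none_alt child parent start end_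
instance (child : List (Option Int)) (parent : List Int) (start : Int) (end_ : Int) (out : List Int) : Decidable (Spec_fill_none child parent start end_ out) := by unfold Spec_fill_none; infer_instance

-- ===== CLAIM (what is proved, stated in full; the proofs are below) =====
def Claim_equal_fill_none : Prop := ∀ (child : List (Option Int)) (parent : List Int) (start : Int) (end_ : Int), Dom_fill_none child parent start end_ → Pre_fill_none child parent start end_ → Spec_fill_none child parent start end_ (fill_none child parent start end_)

-- ===== LEMMAS AND PROOFS =====

-- proof-only abbreviations (not used by the ports or the claim)
def pvRot (n e1 j : Nat) : Nat := (e1 + j) % n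
def pvPred (child : List (Option Int)) (g : Int) : Bool := !(decide (some g ∈ child))
def pvMiss (child : List (Option Int)) (parent : List Int) (e1 : Nat) : List Int :=
  (parent.rotate e1).filter (pvPred child)
def pvFill (c : List (Option Int)) (ps : List Nat) (gs : List Int) : List (Option Int) :=
  (ps.zip gs).foldl (fun c p => c.set p.1 (some p.2)) c
def pvChildAt (child : List (Option Int)) (parent : List Int) (e1 i : Nat) : List (Option Int) :=
  pvFill child ((List.range i).map (pvRot child.length e1)) ((pvMiss child parent e1).take i)
def pvCm (child : List (Option Int)) (parent : List Int) (e1 j : Nat) : Nat :=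
  (((parent.rotate e1).take j).filter (pvPred child)).length

-- the context established by Pre_ when child contains a None
structure PvCtx (child : List (Option Int)) (parent : List Int) (e1 : Nat) : Prop where
  hn : 0 < child.length
  he1 : e1 < child.length
  hp : parent.length = child.length
  hpn : parent.Nodup
  hvn : (child.filterMap (fun g => g)).Nodup
  hsub : ∀ g ∈ child.filterMap (fun g => g), g ∈ parent
  hcons : ∀ j < child.length,
    (child[pvRot child.length e1 j]? = some none ↔ j < child.count none)

theorem pvRot_lt {n : Nat} (hn : 0 < n) (e1 j : Nat) : pvRot n e1 j < n := Nat.mod_lt _ hn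

theorem pvRot_inj {n e1 : Nat} {t1 t2 : Nat} (h1 : t1 < n) (h2 : t2 < n)
    (h : pvRot n e1 t1 = pvRot n e1 t2) : t1 = t2 := by
  unfold pvRot at h
  have : t1 ≡ t2 [MOD n] := Nat.ModEq.add_left_cancel' e1 h
  simpa [Nat.ModEq, Nat.mod_eq_of_lt h1, Nat.mod_eq_of_lt h2] using this

theorem pvRot_surj {n : Nat} (hn : 0 < n) {e1 : Nat} (he1 : e1 < n) {q : Nat} (hq : q < n) :
    ∃ j < n, pvRot n e1 j = q := by
  refine ⟨(q + n - e1) % n, Nat.mod_lt _ hn, ?_⟩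
  unfold pvRot
  rw [Nat.add_mod_mod]
  have h : e1 + (q + n - e1) = q + n := by omega
  rw [h, Nat.add_mod_right, Nat.mod_eq_of_lt hq]

theorem pvRot_succ {n : Nat} (e1 j : Nat) :
    (pvRot n e1 j + 1) % n = pvRot n e1 (j + 1) := by
  unfold pvRot
  rw [Nat.mod_add_mod, Nat.add_assoc]

theorem pvFill_length (c : List (Option Int)) (ps : List Nat) (gs : List Int) :
    (pvFill c ps gs).length = c.length := by
  unfold pvFill
  generalize ps.zip gs = l
  induction l generalizing c with
  | nil => rfl
  | cons p l ih => simp [List.foldl_cons, ih]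

theorem pvChildAt_zero (child : List (Option Int)) (parent : List Int) (e1 : Nat) :
    pvChildAt child parent e1 0 = child := by
  simp [pvChildAt, pvFill]

theorem pvFill_snoc (c : List (Option Int)) (ps : List Nat) (gs : List Int) (p : Nat) (g : Int)
    (hlen : ps.length = gs.length) :
    pvFill c (ps ++ [p]) (gs ++ [g]) = (pvFill c ps gs).set p (some g) := by
  unfold pvFill
  rw [List.zip_append hlen, List.foldl_append]
  rfl

theorem pvChildAt_succ (child : List (Option Int)) (parent : List Int) (e1 : Nat) (i : Nat)
    (hi : i < (pvMiss child parent e1).length) :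
    pvChildAt child parent e1 (i + 1) =
      (pvChildAt child parent e1 i).set (pvRot child.length e1 i)
        (some ((pvMiss child parent e1)[i])) := by
  unfold pvChildAt
  rw [List.range_succ, List.map_append, List.take_add_one,
      List.getElem?_eq_getElem hi]
  exact pvFill_snoc _ _ _ _ _ (by simp [List.length_take]; omega)

theorem pvChildAt_getElem?_untouched (child : List (Option Int)) (parent : List Int) (e1 : Nat)
    {i : Nat} (hik : i ≤ (pvMiss child parent e1).length) {q : Nat}
    (hq : ∀ t < i, pvRot child.length e1 t ≠ q) :
    (pvChildAt child parent e1 i)[q]? = child[q]? := by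
  induction i with
  | zero => rw [pvChildAt_zero]
  | succ m ih =>
    rw [pvChildAt_succ child parent e1 m (by omega),
        List.getElem?_set_ne (hq m (by omega)), ih (by omega) (fun t ht => hq t (by omega))]

theorem pvChildAt_getElem?_touched (child : List (Option Int)) (parent : List Int) (e1 : Nat)
    (hn : 0 < child.length)
    {i : Nat} (hik : i ≤ (pvMiss child parent e1).length) (hin : i ≤ child.length)
    {t : Nat} (ht : t < i) :
    (pvChildAt child parent e1 i)[pvRot child.length e1 t]? =
      some (some ((pvMiss child parent e1)[t]'(by omega))) := by
  induction i with
  | zero => omega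
  | succ m ih =>
    rw [pvChildAt_succ child parent e1 m (by omega)]
    by_cases htm : t = m
    · subst htm
      rw [List.getElem?_set_self (by
        show _ < (pvChildAt child parent e1 t).length
        unfold pvChildAt; rw [pvFill_length]; exact pvRot_lt hn e1 t)]
    · rw [List.getElem?_set_ne
        (fun h => htm (pvRot_inj (by omega) (by omega) h).symm)]
      exact ih (by omega) (by omega) (by omega)

-- count none + number of filled genes = length
theorem pv_count_split (child : List (Option Int)) :
    child.count none + (child.filterMap (fun g => g)).length = child.length := by
  induction child with
  | nil => rfl
  | cons a l ih =>
    cases a <;> simp <;> omega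

theorem pv_mem_filterMap (child : List (Option Int)) (g : Int) :
    g ∈ child.filterMap (fun x => x) ↔ some g ∈ child := by
  simp [List.mem_filterMap]

theorem pvMiss_length {child : List (Option Int)} {parent : List Int} {e1 : Nat}
    (ctx : PvCtx child parent e1) :
    (pvMiss child parent e1).length = child.count none := by
  have hperm := List.rotate_perm parent e1
  have hcount : (pvMiss child parent e1).length = parent.countP (pvPred child) := by
    rw [pvMiss, ← List.countP_eq_length_filter]
    exact hperm.countP_eq _
  have hsplit := List.length_eq_countP_add_countP (l := parent)
    (fun g => decide (some g ∈ child))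
  have hnoteq : parent.countP (fun a => decide ¬((fun g => decide (some g ∈ child)) a = true)) =
      parent.countP (pvPred child) :=
    List.countP_congr (by intro a _; simp [pvPred])
  rw [hnoteq] at hsplit
  -- countP (some · ∈ child) parent = number of filled genes
  have hmemcount : parent.countP (fun g => decide (some g ∈ child)) =
      (child.filterMap (fun g => g)).length := by
    rw [List.countP_eq_length_filter]
    have hfn : (parent.filter (fun g => decide (some g ∈ child))).Nodup :=
      ctx.hpn.filter _
    have hmem : ∀ g, g ∈ parent.filter (fun x => decide (some x ∈ child)) ↔
        g ∈ child.filterMap (fun x => x) := by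
      intro g
      rw [List.mem_filter, pv_mem_filterMap]
      constructor
      · rintro ⟨-, h⟩; exact of_decide_eq_true h
      · intro h
        exact ⟨ctx.hsub g ((pv_mem_filterMap child g).mpr h), decide_eq_true h⟩
    have h1 := List.toFinset_card_of_nodup hfn
    have h2 := List.toFinset_card_of_nodup ctx.hvn
    have heq : (parent.filter (fun g => decide (some g ∈ child))).toFinset =
        (child.filterMap (fun g => g)).toFinset := by
      ext g; simp only [List.mem_toFinset]; exact hmem g
    rw [heq] at h1; omega
  have hS := pv_count_split child
  have hp := ctx.hp
  rw [hcount]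
  omega

theorem pv_k_le (child : List (Option Int)) : child.count none ≤ child.length :=
  List.count_le_length

-- None remains in the partially filled child iff not all empty slots are filled
theorem pvChildAt_length (child : List (Option Int)) (parent : List Int) (e1 i : Nat) :
    (pvChildAt child parent e1 i).length = child.length := by
  unfold pvChildAt; rw [pvFill_length]

theorem pvChildAt_none_mem {child : List (Option Int)} {parent : List Int} {e1 : Nat}
    (ctx : PvCtx child parent e1) {i : Nat} (hik : i ≤ child.count none) :
    none ∈ pvChildAt child parent e1 i ↔ i < child.count none := by
  have hk := pv_k_le child
  have hm := pvMiss_length ctx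
  constructor
  · intro hmem
    by_contra hlt
    have hi : i = child.count none := by omega
    subst hi
    obtain ⟨q, hq⟩ := List.mem_iff_getElem?.mp hmem
    obtain ⟨hqlt, -⟩ := List.getElem?_eq_some_iff.mp hq
    rw [pvChildAt_length] at hqlt
    obtain ⟨j, hj, hrot⟩ := pvRot_surj ctx.hn ctx.he1 hqlt
    subst hrot
    by_cases hjk : j < child.count none
    · rw [pvChildAt_getElem?_touched child parent e1 ctx.hn (by omega) (by omega) hjk] at hq
      simp at hq
    · rw [pvChildAt_getElem?_untouched child parent e1
        (i := child.count none) (q := pvRot child.length e1 j) (by omega)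
        (fun t ht h => hjk ((pvRot_inj (by omega) hj h) ▸ ht))] at hq
      exact hjk ((ctx.hcons j hj).mp hq)
  · intro hlt
    have huntouched : (pvChildAt child parent e1 i)[pvRot child.length e1 i]? =
        child[pvRot child.length e1 i]? :=
      pvChildAt_getElem?_untouched child parent e1 (by omega)
        (fun t ht h => absurd (pvRot_inj (by omega) (by omega) h) (by omega))
    rw [(ctx.hcons i (by omega)).mpr hlt] at huntouched
    exact List.mem_iff_getElem?.mpr ⟨_, huntouched⟩

-- filled gene membership in the partially filled child
theorem pvChildAt_some_mem {child : List (Option Int)} {parent : List Int} {e1 : Nat}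
    (ctx : PvCtx child parent e1) {i : Nat} (hik : i ≤ child.count none) (g : Int) :
    some g ∈ pvChildAt child parent e1 i ↔
      some g ∈ child ∨ g ∈ (pvMiss child parent e1).take i := by
  have hk := pv_k_le child
  have hm := pvMiss_length ctx
  constructor
  · intro hmem
    obtain ⟨q, hq⟩ := List.mem_iff_getElem?.mp hmem
    obtain ⟨hqlt, -⟩ := List.getElem?_eq_some_iff.mp hq
    rw [pvChildAt_length] at hqlt
    obtain ⟨j, hj, hrot⟩ := pvRot_surj ctx.hn ctx.he1 hqlt
    subst hrot
    by_cases hji : j < i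
    · rw [pvChildAt_getElem?_touched child parent e1 ctx.hn (by omega) (by omega) hji] at hq
      right
      have hg : (pvMiss child parent e1)[j]'(by omega) = g := by simpa using hq
      exact hg ▸ List.mem_take_iff_getElem.mpr ⟨j, by omega, rfl⟩
    · rw [pvChildAt_getElem?_untouched child parent e1
        (i := i) (q := pvRot child.length e1 j) (by omega)
        (fun t ht h => hji ((pvRot_inj (by omega) hj h) ▸ ht))] at hq
      exact Or.inl (List.mem_iff_getElem?.mpr ⟨_, hq⟩)
  · rintro (hmem | hmem)
    · obtain ⟨q, hq⟩ := List.mem_iff_getElem?.mp hmem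
      have huntouched : (pvChildAt child parent e1 i)[q]? = child[q]? :=
        pvChildAt_getElem?_untouched child parent e1 (by omega)
          (fun t ht h => by
            have ht' : t < child.count none := by omega
            have hc := (ctx.hcons t (by omega)).mpr ht'
            rw [h, hq] at hc
            simp at hc)
      rw [hq] at huntouched
      exact List.mem_iff_getElem?.mpr ⟨_, huntouched⟩
    · obtain ⟨t, ht, rfl⟩ := List.mem_take_iff_getElem.mp hmem
      have ht' : t < i := by omega
      have htt := pvChildAt_getElem?_touched child parent e1 ctx.hn (by omega) (by omega) ht'
      exact List.mem_iff_getElem?.mpr ⟨_, htt⟩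

-- cm lemmas: number of missing genes among the first j scanned parent genes
theorem pvCm_zero (child : List (Option Int)) (parent : List Int) (e1 : Nat) :
    pvCm child parent e1 0 = 0 := rfl

theorem pvCm_le (child : List (Option Int)) (parent : List Int) (e1 j : Nat) :
    pvCm child parent e1 j ≤ (pvMiss child parent e1).length := by
  unfold pvCm pvMiss
  conv_rhs => rw [← List.take_append_drop j (parent.rotate e1)]
  rw [List.filter_append, List.length_append]
  omega

theorem pvMiss_take_cm (child : List (Option Int)) (parent : List Int) (e1 j : Nat) :
    (pvMiss child parent e1).take (pvCm child parent e1 j) =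
      ((parent.rotate e1).take j).filter (pvPred child) := by
  have hsplit : pvMiss child parent e1 =
      ((parent.rotate e1).take j).filter (pvPred child) ++
        ((parent.rotate e1).drop j).filter (pvPred child) := by
    rw [← List.filter_append, List.take_append_drop]; rfl
  unfold pvCm
  rw [hsplit]
  exact List.take_left' rfl

theorem pvCm_full (child : List (Option Int)) (parent : List Int) (e1 j : Nat)
    (hj : (parent.rotate e1).length ≤ j) :
    pvCm child parent e1 j = (pvMiss child parent e1).length := by
  unfold pvCm pvMiss
  rw [List.take_of_length_le hj]

theorem pvCm_succ (child : List (Option Int)) (parent : List Int) (e1 j : Nat)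
    (hj : j < (parent.rotate e1).length) :
    pvCm child parent e1 (j + 1) =
      pvCm child parent e1 j +
        (if pvPred child ((parent.rotate e1)[j]'hj) then 1 else 0) := by
  unfold pvCm
  rw [List.take_add_one, List.getElem?_eq_getElem hj]
  simp [List.filter_append]
  split_ifs with h <;> simp [h]

theorem pv_mod_cast_succ (n m : Nat) :
    PySem.Int.mod ((m : Int) + 1) (n : Int) = (((m + 1) % n : Nat) : Int) := by
  rw [show ((m : Int) + 1) = ((m + 1 : Nat) : Int) by push_cast; ring]
  exact PySem.Int.mod_natCast _ _

theorem pv_scan_fresh {parent : List Int} (hpn : parent.Nodup) (e1 j : Nat)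
    (hj : j < (parent.rotate e1).length) :
    (parent.rotate e1)[j] ∉ (parent.rotate e1).take j := by
  intro hmem
  obtain ⟨t, ht, hteq⟩ := List.mem_take_iff_getElem.mp hmem
  have hnd : (parent.rotate e1).Nodup := List.nodup_rotate.mpr hpn
  have := (hnd.getElem_inj_iff).mp hteq
  omega

-- the simulation invariant for A's while loop: after scanning the first j parent genes,
-- the loop's state is (child filled with the missing genes seen so far), and the loop
-- converges to the fully filled child
theorem pvLoop {child : List (Option Int)} {parent : List Int} {e1 : Nat}
    (ctx : PvCtx child parent e1) :
    ∀ d j, j + d = child.length → ∀ fuel, d < fuel →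
      fill_none_loop parent (child.length : Int) fuel
        (pvChildAt child parent e1 (pvCm child parent e1 j))
        ((pvRot child.length e1 (pvCm child parent e1 j) : Nat) : Int)
        ((pvRot child.length e1 j : Nat) : Int)
      = pvChildAt child parent e1 (child.count none) := by
  have hm := pvMiss_length ctx
  have hk := pv_k_le child
  have hrotlen : (parent.rotate e1).length = child.length := by
    rw [List.length_rotate]; exact ctx.hp
  intro d
  induction d with
  | zero =>
    intro j hj fuel hfuel
    obtain ⟨f, rfl⟩ : ∃ f, fuel = f + 1 := ⟨fuel - 1, by omega⟩
    have hcm : pvCm child parent e1 j = child.count none := by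
      rw [pvCm_full child parent e1 j (by omega), hm]
    rw [hcm]
    simp only [fill_none_loop]
    rw [if_neg (by
      intro hmem
      exact absurd ((pvChildAt_none_mem ctx (le_refl _)).mp hmem) (by omega))]
  | succ d' ih =>
    intro j hj fuel hfuel
    obtain ⟨f, rfl⟩ : ∃ f, fuel = f + 1 := ⟨fuel - 1, by omega⟩
    simp only [fill_none_loop]
    set c := pvCm child parent e1 j with hc
    have hcle : c ≤ (pvMiss child parent e1).length := pvCm_le child parent e1 j
    by_cases hck : c = child.count none
    · rw [if_neg (by
        intro hmem
        exact absurd ((pvChildAt_none_mem ctx (by omega)).mp hmem) (by omega))]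
      rw [hck]
    · have hclt : c < child.count none := by omega
      rw [if_pos ((pvChildAt_none_mem ctx (by omega)).mpr hclt)]
      have hjn : j < child.length := by omega
      have hrotj : pvRot child.length e1 j < parent.length := by
        rw [ctx.hp]; exact pvRot_lt ctx.hn e1 j
      rw [show ((pvRot child.length e1 j : Nat) : Int) =
            ((pvRot child.length e1 j : Nat) : Int) from rfl,
          PySem.List.pyGet?_natCast parent (pvRot child.length e1 j),
          List.getElem?_eq_getElem hrotj]
      dsimp only
      set g := parent[pvRot child.length e1 j]'hrotj with hg
      have hjrot : j < (parent.rotate e1).length := by omega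
      have hscan : (parent.rotate e1)[j]'hjrot = g := by
        rw [List.getElem_rotate]
        congr 1
        rw [ctx.hp, Nat.add_comm]
        rfl
      have hfresh : g ∉ (parent.rotate e1).take j := by
        rw [← hscan]; exact pv_scan_fresh ctx.hpn e1 j hjrot
      have hgtake : g ∉ (pvMiss child parent e1).take c := by
        rw [hc, pvMiss_take_cm]
        intro hmem
        exact hfresh (List.mem_of_mem_filter hmem)
      have hcond : some g ∈ pvChildAt child parent e1 c ↔ some g ∈ child := by
        rw [pvChildAt_some_mem ctx (by omega)]
        exact ⟨fun h => h.elim id (fun h' => absurd h' hgtake), Or.inl⟩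
      have harith_p : PySem.Int.mod (((pvRot child.length e1 j : Nat) : Int) + 1)
          ((child.length : Nat) : Int) = ((pvRot child.length e1 (j + 1) : Nat) : Int) := by
        rw [pv_mod_cast_succ, pvRot_succ]
      by_cases hmemg : some g ∈ child
      · -- gene already present: skip, state unchanged
        rw [if_neg (by simpa [hcond] using hmemg)]
        have hcm1 : pvCm child parent e1 (j + 1) = c := by
          rw [pvCm_succ child parent e1 j hjrot, if_neg (by simp [pvPred, hscan, hmemg]),
            Nat.add_zero]
        have := ih (j + 1) (by omega) f (by omega)
        rw [hcm1] at this
        rw [harith_p]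
        exact this
      · -- missing gene: place it at the current fill slot
        rw [if_pos (by simpa [hcond] using hmemg)]
        have hpredg : pvPred child g = true := by simp [pvPred, hmemg]
        have hpred : pvPred child ((parent.rotate e1)[j]'hjrot) = true := by
          rw [hscan]; exact hpredg
        have hcm1 : pvCm child parent e1 (j + 1) = c + 1 := by
          rw [pvCm_succ child parent e1 j hjrot, if_pos hpred]
        have hmissc : (pvMiss child parent e1)[c]'(by omega) = g := by
          have h1 := pvMiss_take_cm child parent e1 (j + 1)
          have h2 := pvMiss_take_cm child parent e1 j
          rw [hcm1] at h1
          rw [← hc] at h2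
          have h3 : ((parent.rotate e1).take (j + 1)).filter (pvPred child) =
              ((parent.rotate e1).take j).filter (pvPred child) ++ [g] := by
            rw [List.take_add_one, List.getElem?_eq_getElem hjrot, hscan, List.filter_append]
            congr 1
            simp [hpredg]
          have hstep : (pvMiss child parent e1).take (c + 1) =
              (pvMiss child parent e1).take c ++ [g] := by
            rw [h1, h3, h2]
          have h4 : (pvMiss child parent e1).take (c + 1) =
              (pvMiss child parent e1).take c ++
                [(pvMiss child parent e1)[c]'(by omega)] := by
            rw [List.take_add_one,
              List.getElem?_eq_getElem (show c < (pvMiss child parent e1).length by omega)]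
            rfl
          rw [h4] at hstep
          have h5 := List.append_cancel_left hstep
          simpa using h5
        have hset : PySem.List.pySetD (pvChildAt child parent e1 c)
            ((pvRot child.length e1 c : Nat) : Int) (some g) =
            pvChildAt child parent e1 (c + 1) := by
          rw [PySem.List.pySetD_natCast, pvChildAt_succ child parent e1 c (by omega), hmissc]
        have harith_f : PySem.Int.mod (((pvRot child.length e1 c : Nat) : Int) + 1)
            ((child.length : Nat) : Int) = ((pvRot child.length e1 (c + 1) : Nat) : Int) := by
          rw [pv_mod_cast_succ, pvRot_succ]
        rw [hset, harith_f, harith_p]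
        have := ih (j + 1) (by omega) f (by omega)
        rw [hcm1] at this
        exact this

-- ===== B-side lemmas =====

theorem pv_contains_iff (s : PySem.Set Int) (x : Int) :
    PySem.Set.contains s x = true ↔ x ∈ s := by
  simp [PySem.Set.contains]

theorem pv_foldl_range_getD {α β : Type} (d : α) (f : β → α → β) :
    ∀ (l : List α) (init : β),
      (List.range l.length).foldl (fun acc j => f acc (l.getD j d)) init = l.foldl f init := by
  intro l
  induction l with
  | nil => intro init; rfl
  | cons a t ih =>
    intro init
    rw [List.length_cons, List.range_succ_eq_map, List.foldl_cons, List.foldl_map]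
    simp only [List.getD_cons_zero, List.getD_cons_succ, Nat.succ_eq_add_one]
    exact ih (f init a)

-- B's seen-set pass collects exactly the genes absent from child (live set irrelevant
-- when the scanned genes are distinct)
theorem pvSeen_fold (child : List (Option Int)) :
    ∀ (l : List Int), l.Nodup →
      ∀ (acc : List Int) (s : PySem.Set Int),
        (∀ x : Int, PySem.Set.contains s x = true ↔ (some x ∈ child ∨ x ∈ acc)) →
        (∀ x ∈ l, x ∉ acc) →
        (l.foldl (fun (a : List Int × PySem.Set Int) g =>
            if PySem.Set.contains a.2 g then a else (a.1 ++ [g], PySem.Set.add a.2 g))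
          (acc, s)).1 = acc ++ l.filter (pvPred child) := by
  intro l
  induction l with
  | nil => intro _ acc s _ _; simp
  | cons g t ih =>
    intro hnd acc s hinv hdis
    rw [List.foldl_cons]
    by_cases hg : PySem.Set.contains s g = true
    · have hgc : some g ∈ child := by
        rcases (hinv g).mp hg with h | h
        · exact h
        · exact absurd h (hdis g (by simp))
      rw [if_pos hg, List.filter_cons_of_neg (by simp [pvPred, hgc])]
      exact ih (List.Nodup.of_cons hnd) acc s hinv (fun x hx => hdis x (by simp [hx]))
    · have hgc : ¬ some g ∈ child := fun h => hg ((hinv g).mpr (Or.inl h))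
      rw [if_neg hg, List.filter_cons_of_pos (by simp [pvPred, hgc])]
      have hinv' : ∀ x : Int, PySem.Set.contains (PySem.Set.add s g) x = true ↔
          (some x ∈ child ∨ x ∈ acc ++ [g]) := by
        intro x
        rw [pv_contains_iff, PySem.Set.mem_add, ← pv_contains_iff s x, hinv x]
        simp [or_assoc]
      have hdis' : ∀ x ∈ t, x ∉ acc ++ [g] := by
        intro x hx
        simp only [List.mem_append, List.mem_singleton]
        rintro (h | rfl)
        · exact hdis x (by simp [hx]) h
        · exact (List.nodup_cons.mp hnd).1 hx
      rw [ih (List.Nodup.of_cons hnd) (acc ++ [g]) (PySem.Set.add s g) hinv' hdis']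
      simp

-- if-comprehension over range n keeping exactly the first k indices
theorem pv_filterMap_range_if {α : Type} (n k : Nat) (hk : k ≤ n) (g : Nat → α) :
    (List.range n).filterMap (fun j => if j < k then some (g j) else none) =
      (List.range k).map g := by
  have hsplit : List.range n = List.range k ++ (List.range (n - k)).map (fun x => k + x) := by
    rw [← List.range_add]
    congr 1
    omega
  rw [hsplit, List.filterMap_append]
  have h1 : (List.range k).filterMap (fun j => if j < k then some (g j) else none) =
      (List.range k).map g := by
    rw [List.filterMap_congr (g := fun j => (some ∘ g) j)
      (by intro j hj; rw [if_pos (List.mem_range.mp hj)]; rfl)]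
    exact List.filterMap_eq_map (f := g) ▸ rfl
  have h2 : ((List.range (n - k)).map (fun x => k + x)).filterMap
      (fun j => if j < k then some (g j) else none) = [] := by
    rw [List.filterMap_eq_nil_iff]
    intro a ha
    obtain ⟨x, -, rfl⟩ := List.mem_map.mp ha
    rw [if_neg (by omega)]
  rw [h1, h2, List.append_nil]

-- the zip-assignment over Int indices is pvFill
theorem pv_zipfill :
    ∀ (ps : List Nat) (gs : List Int) (c : List (Option Int)),
      (((ps.map (fun (q : Nat) => (q : Int))).zip gs).foldl
        (fun c pg => PySem.List.pySetD c pg.1 (some pg.2)) c) = pvFill c ps gs := by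
  intro ps
  induction ps with
  | nil => intro gs c; cases gs <;> rfl
  | cons p t ih =>
    intro gs c
    cases gs with
    | nil => rfl
    | cons g gt =>
      rw [List.map_cons, List.zip_cons_cons, List.foldl_cons]
      unfold pvFill
      rw [List.zip_cons_cons, List.foldl_cons, PySem.List.pySetD_natCast]
      exact ih gt _

-- ===== assembling both ports =====

theorem pv_mod_e1 {child : List (Option Int)} (hn : 0 < child.length) (end_ : Int) :
    PySem.Int.mod (end_ + 1) (child.length : Int) =
      ((((end_ + 1) % (child.length : Int)).toNat : Nat) : Int) := by
  have hnI : (0 : Int) < (child.length : Int) := by exact_mod_cast hn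
  rw [PySem.Int.mod_eq_emod_of_pos hnI,
    Int.toNat_of_nonneg (Int.emod_nonneg _ (by omega))]

-- A's port computes the fully filled child
theorem pvA {child : List (Option Int)} {parent : List Int} (start end_ : Int)
    (ctx : PvCtx child parent ((end_ + 1) % (child.length : Int)).toNat) :
    fill_none child parent start end_ =
      (pvChildAt child parent ((end_ + 1) % (child.length : Int)).toNat
        (child.count none)).map (fun o => o.getD 0) := by
  unfold fill_none
  dsimp only
  rw [pv_mod_e1 ctx.hn end_]
  have hloop := pvLoop ctx child.length 0 (by omega) (child.length + 1) (by omega)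
  rw [pvCm_zero, pvChildAt_zero] at hloop
  have hrot0 : pvRot child.length ((end_ + 1) % (child.length : Int)).toNat 0 =
      ((end_ + 1) % (child.length : Int)).toNat := by
    unfold pvRot; rw [Nat.add_zero, Nat.mod_eq_of_lt ctx.he1]
  rw [hrot0] at hloop
  rw [hloop]

-- B's port computes the fully filled child
theorem pvB {child : List (Option Int)} {parent : List Int} (start end_ : Int)
    (ctx : PvCtx child parent ((end_ + 1) % (child.length : Int)).toNat) :
    fill_none_alt child parent start end_ =
      (pvChildAt child parent ((end_ + 1) % (child.length : Int)).toNat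
        (child.count none)).map (fun o => o.getD 0) := by
  have hn := ctx.hn
  have hm := pvMiss_length ctx
  have hk := pv_k_le child
  have hrotlen : (parent.rotate ((end_ + 1) % (child.length : Int)).toNat).length =
      child.length := by rw [List.length_rotate]; exact ctx.hp
  set e1 := ((end_ + 1) % (child.length : Int)).toNat with he1def
  have hcast : ∀ j : Nat, PySem.Int.mod ((e1 : Int) + (j : Int)) (child.length : Int) =
      ((pvRot child.length e1 j : Nat) : Int) := by
    intro j
    rw [show ((e1 : Int) + (j : Int)) = ((e1 + j : Nat) : Int) by push_cast; ring,
      PySem.Int.mod_natCast]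
    rfl
  unfold fill_none_alt
  dsimp only
  rw [pv_mod_e1 hn end_, ← he1def, PySem.List.pyRange_zero_nat]
  -- the missing-gene pass computes pvMiss
  have hmiss : (((List.range child.length).map (fun (k : Nat) => (k : Int))).foldl
      (fun (acc : List Int × PySem.Set Int) j =>
        if PySem.Set.contains acc.2
            (PySem.List.pyGetD parent (PySem.Int.mod ((e1 : Int) + j) (child.length : Int)) 0)
          then acc
          else (acc.1 ++ [PySem.List.pyGetD parent
                  (PySem.Int.mod ((e1 : Int) + j) (child.length : Int)) 0],
                PySem.Set.add acc.2 (PySem.List.pyGetD parent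
                  (PySem.Int.mod ((e1 : Int) + j) (child.length : Int)) 0)))
      ([], PySem.Set.ofList (child.filterMap (fun g => g)))).1
      = pvMiss child parent e1 := by
    rw [List.foldl_map]
    have hbody : ∀ (acc : List Int × PySem.Set Int), ∀ j ∈ List.range child.length,
        (fun (acc : List Int × PySem.Set Int) (j : Nat) =>
          if PySem.Set.contains acc.2
              (PySem.List.pyGetD parent
                (PySem.Int.mod ((e1 : Int) + (j : Int)) (child.length : Int)) 0)
            then acc
            else (acc.1 ++ [PySem.List.pyGetD parent
                    (PySem.Int.mod ((e1 : Int) + (j : Int)) (child.length : Int)) 0],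
                  PySem.Set.add acc.2 (PySem.List.pyGetD parent
                    (PySem.Int.mod ((e1 : Int) + (j : Int)) (child.length : Int)) 0))) acc j
        = (fun (acc : List Int × PySem.Set Int) (j : Nat) =>
          if PySem.Set.contains acc.2 ((parent.rotate e1).getD j 0)
            then acc
            else (acc.1 ++ [(parent.rotate e1).getD j 0],
                  PySem.Set.add acc.2 ((parent.rotate e1).getD j 0))) acc j := by
      intro acc j hj
      have hjn : j < child.length := List.mem_range.mp hj
      have hget : PySem.List.pyGetD parent
          (PySem.Int.mod ((e1 : Int) + (j : Int)) (child.length : Int)) 0 =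
          (parent.rotate e1).getD j 0 := by
        rw [hcast j, PySem.List.pyGetD_natCast,
          List.getD_eq_getElem parent 0 (by rw [ctx.hp]; exact pvRot_lt hn e1 j),
          List.getD_eq_getElem _ 0 (by omega)]
        rw [List.getElem_rotate]
        congr 1
        rw [ctx.hp, Nat.add_comm]
        rfl
      dsimp only
      rw [hget]
    rw [List.foldl_ext _ _ _ hbody]
    have hlen : List.range child.length = List.range (parent.rotate e1).length := by
      rw [hrotlen]
    rw [hlen, pv_foldl_range_getD 0
      (fun (a : List Int × PySem.Set Int) (g : Int) =>
        if PySem.Set.contains a.2 g then a else (a.1 ++ [g], PySem.Set.add a.2 g))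
      (parent.rotate e1) ([], PySem.Set.ofList (child.filterMap (fun g => g)))]
    rw [pvSeen_fold child (parent.rotate e1) (List.nodup_rotate.mpr ctx.hpn) []
      (PySem.Set.ofList (child.filterMap (fun g => g)))
      (by
        intro x
        rw [pv_contains_iff, PySem.Set.mem_ofList, pv_mem_filterMap]
        simp)
      (by simp)]
    rw [List.nil_append]
    rfl
  rw [hmiss]
  -- the empty-slot pass computes the fill positions
  have hslots : ((List.range child.length).map (fun (k : Nat) => (k : Int))).filterMap
      (fun j =>
        if PySem.List.pyGetD child (PySem.Int.mod ((e1 : Int) + j) (child.length : Int)) none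
            = none
          then some (PySem.Int.mod ((e1 : Int) + j) (child.length : Int)) else none)
      = ((List.range (child.count none)).map (pvRot child.length e1)).map
          (fun (q : Nat) => (q : Int)) := by
    rw [List.filterMap_map]
    rw [List.filterMap_congr (g := fun (j : Nat) =>
      if j < child.count none then some ((pvRot child.length e1 j : Nat) : Int) else none)
      (by
        intro j hj
        have hjn : j < child.length := List.mem_range.mp hj
        dsimp only [Function.comp]
        rw [hcast j, PySem.List.pyGetD_natCast,
          List.getD_eq_getElem child none (pvRot_lt hn e1 j)]
        have hiff : (child[pvRot child.length e1 j]'(pvRot_lt hn e1 j) = none) ↔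
            j < child.count none := by
          rw [← Option.some_inj, ← List.getElem?_eq_getElem (pvRot_lt hn e1 j)]
          exact ctx.hcons j hjn
        by_cases hjk : j < child.count none
        · rw [if_pos (hiff.mpr hjk), if_pos hjk]
        · rw [if_neg (fun h => hjk (hiff.mp h)), if_neg hjk])]
    rw [pv_filterMap_range_if child.length (child.count none) hk
      (fun t => ((pvRot child.length e1 t : Nat) : Int))]
    rw [List.map_map]
    rfl
  rw [hslots, pv_zipfill]
  unfold pvChildAt
  rw [List.take_of_length_le (by omega)]

-- trivial case: no empty slot, both ports return child unchanged
theorem pvA_noslot {child : List (Option Int)} {parent : List Int} (start end_ : Int)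
    (hnone : none ∉ child) :
    fill_none child parent start end_ = child.map (fun o => o.getD 0) := by
  unfold fill_none
  dsimp only
  simp only [fill_none_loop]
  rw [if_neg hnone]

theorem pvB_noslot {child : List (Option Int)} {parent : List Int} (start end_ : Int)
    (hn : 0 < child.length) (hnone : none ∉ child) :
    fill_none_alt child parent start end_ = child.map (fun o => o.getD 0) := by
  have hnI : (0 : Int) < (child.length : Int) := by exact_mod_cast hn
  unfold fill_none_alt
  dsimp only
  have hslots : (PySem.List.pyRange 0 (child.length : Int) 1).filterMap
      (fun j =>
        if PySem.List.pyGetD child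
            (PySem.Int.mod (PySem.Int.mod (end_ + 1) (child.length : Int) + j)
              (child.length : Int)) none = none
          then some (PySem.Int.mod (PySem.Int.mod (end_ + 1) (child.length : Int) + j)
              (child.length : Int)) else none) = [] := by
    rw [List.filterMap_eq_nil_iff]
    intro j hj
    have hi0 : (0 : Int) ≤ PySem.Int.mod (PySem.Int.mod (end_ + 1) (child.length : Int) + j)
        (child.length : Int) := PySem.Int.mod_nonneg _ hnI
    have hi1 : PySem.Int.mod (PySem.Int.mod (end_ + 1) (child.length : Int) + j)
        (child.length : Int) < (child.length : Int) := PySem.Int.mod_lt _ hnI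
    rw [if_neg]
    rw [PySem.List.pyGetD_eq_getElem child none hi0 (by exact_mod_cast hi1)]
    intro h
    exact hnone (h ▸ List.getElem_mem _)
  rw [hslots]
  simp

-- ===== VERDICT (by name: the statement is the Claim_ definition above) =====
theorem fill_none_spec : Claim_equal_fill_none := by
  intro child parent start end_ _ hpre
  obtain ⟨hn, hlen, himp⟩ := hpre
  unfold Spec_fill_none
  by_cases hnone : none ∈ child
  · obtain ⟨hp, hpn, hvn, hsub, hcons⟩ := himp hnone
    have he1 : ((end_ + 1) % (child.length : Int)).toNat < child.length := by
      have h1 : (end_ + 1) % (child.length : Int) < (child.length : Int) :=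
        Int.emod_lt_of_pos _ (by exact_mod_cast hn)
      omega
    have ctx : PvCtx child parent ((end_ + 1) % (child.length : Int)).toNat :=
      ⟨hn, he1, hp, hpn, hvn, hsub, fun j hj => by
        have := hcons j hj
        simpa [pvRot] using this⟩
    rw [pvA start end_ ctx, pvB start end_ ctx]
  · rw [pvA_noslot start end_ hnone, pvB_noslot start end_ hn hnone]
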